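-- pv_equiv track=rewrite | github.com/bkshin01/Algorithm | 프로그래머스/3/12987. 숫자 게임/숫자 게임.py | solution
-- ===== SOURCE A (Python) =====
-- from collections import deque
--
-- def solution(A, B):
--     answer = 0
--     A.sort(reverse=True)
--     B.sort(reverse=True)
--     B = deque(B)
--     for i in range(len(A)):
--         if A[i] < B[0]:
--             answer += 1
--             B.popleft()
--     return answer
-- ===== SOURCE B (Python) =====
-- def solution(A, B):
--     A.sort(reverse=True)
--     B.sort(reverse=True)
--     answer = 0
--     i = len(A) - 1
--     for b in reversed(B):
--         if i >= 0 and b > A[i]: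
--             answer += 1
--             i -= 1
--     return answer
-- ===== Notes on version B (the rewrite author's own statement) =====
-- stated objective: idiomatic
-- what changed: Replaced the deque consumed from the front of the largest elements by a two-pointer scan from the smallest elements: iterate over reversed(B) with an index walking A's tail inward, dropping the deque and the range-indexed loop; B returns A's exact value on every input where A returns.
import Mathlib
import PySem

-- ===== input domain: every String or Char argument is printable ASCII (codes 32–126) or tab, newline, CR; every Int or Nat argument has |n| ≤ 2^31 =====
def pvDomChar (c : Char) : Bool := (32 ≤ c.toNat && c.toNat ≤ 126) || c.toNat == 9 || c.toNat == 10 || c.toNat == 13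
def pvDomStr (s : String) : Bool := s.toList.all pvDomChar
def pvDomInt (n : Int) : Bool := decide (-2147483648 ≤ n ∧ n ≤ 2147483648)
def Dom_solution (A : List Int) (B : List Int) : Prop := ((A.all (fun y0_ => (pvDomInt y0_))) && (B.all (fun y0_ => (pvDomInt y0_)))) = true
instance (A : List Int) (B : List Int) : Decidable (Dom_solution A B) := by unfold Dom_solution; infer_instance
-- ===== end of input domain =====

-- B replaces the front-consumed deque over the largest elements by a two-pointer scan
-- from the smallest elements (iterate reversed(B), index walking A inward); equivalence
-- is about the RETURN value — both versions sort A and B in place descending the same way.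

-- ===== PORT A =====
-- one loop step: compare A[i] with B[0] of the remaining deque, pop on a win
def stepA (st : Int × List Int) (x : Int) : Int × List Int :=
  match st.2 with
  | [] => st            -- B[0] on an empty deque raises IndexError in Python (outside Pre_)
  | y :: rest => if x < y then (st.1 + 1, rest) else st

def solution (A : List Int) (B : List Int) : Int :=
  ((PySem.List.pyRange 0 ((PySem.List.sorted A id true).length : Int) 1).foldl
      (fun st i => stepA st (PySem.List.pyGetD (PySem.List.sorted A id true) i 0))
      ((0 : Int), PySem.List.sorted B id true)).1

-- ===== PORT B =====
-- one loop step of Source B: if i >= 0 and b > A[i]: answer += 1; i -= 1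
def stepB (aS : List Int) (st : Int × Int) (b : Int) : Int × Int :=
  if st.2 ≥ 0 ∧ b > PySem.List.pyGetD aS st.2 0 then (st.1 + 1, st.2 - 1) else st

def solution_alt (A : List Int) (B : List Int) : Int :=
  ((PySem.List.sorted B id true).reverse.foldl (stepB (PySem.List.sorted A id true))
      ((0 : Int), ((PySem.List.sorted A id true).length : Int) - 1)).1

-- ===== PRECONDITION & SPEC =====
-- Pre_ excludes exactly the inputs on which A raises IndexError (the deque of B is
-- emptied before the loop over A ends): that happens iff len(B) < len(A) and every
-- j-th smallest element of B beats the (j+1)-th smallest element of A.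
def Pre_solution (A : List Int) (B : List Int) : Prop :=
  ¬ (B.length < A.length ∧
      ∀ p ∈ (PySem.List.sorted B id false).zip ((PySem.List.sorted A id false).drop 1),
        p.2 < p.1)
instance (A : List Int) (B : List Int) : Decidable (Pre_solution A B) := by unfold Pre_solution; infer_instance
def pvWitness_solution : List Int × List Int := ([3, 1, 2], [4, 2, 5])

def Spec_solution (A : List Int) (B : List Int) (out : Int) : Prop := out = solution_alt A B
instance (A : List Int) (B : List Int) (out : Int) : Decidable (Spec_solution A B out) := by unfold Spec_solution; infer_instance

-- ===== CLAIM (what is proved, stated in full; the proofs are below) =====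
def Claim_equal_solution : Prop := ∀ (A : List Int) (B : List Int), Dom_solution A B → Pre_solution A B → Spec_solution A B (solution A B)

-- ===== LEMMAS AND PROOFS =====

-- recursive reading of A's loop: a descending, b the remaining deque (largest first)
def fRec : List Int → List Int → Int
  | [], _ => 0
  | _ :: _, [] => 0
  | x :: a, y :: b => if x < y then 1 + fRec a b else fRec a (y :: b)

-- recursive reading of B's loop on ASCENDING lists (smallest first)
def gRec : List Int → List Int → Int
  | _, [] => 0
  | [], _ :: b => gRec [] b
  | u :: a, v :: b => if v > u then 1 + gRec a b else gRec (u :: a) b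

theorem gRec_nil_left (b : List Int) : gRec [] b = 0 := by
  induction b with
  | nil => simp [gRec]
  | cons v b ih => simp [gRec, ih]

theorem gRec_nil_right (a : List Int) : gRec a [] = 0 := by
  cases a <;> simp [gRec]

theorem fRec_nil_right (a : List Int) : fRec a [] = 0 := by
  cases a <;> simp [fRec]

-- A's fold equals fRec
theorem foldA_eq (a : List Int) : ∀ (bq : List Int) (ans : Int),
    (a.foldl stepA (ans, bq)).1 = ans + fRec a bq := by
  induction a with
  | nil => intro bq ans; simp [fRec]
  | cons x a ih =>
    intro bq ans
    cases bq with
    | nil => simp [List.foldl_cons, stepA, fRec, ih, fRec_nil_right]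
    | cons y rest =>
      by_cases h : x < y
      · simp [List.foldl_cons, stepA, fRec, h, ih]; ring
      · simp [List.foldl_cons, stepA, fRec, h, ih]

-- B's fold equals gRec on the reversed taken prefix of aS
theorem foldB_eq (a : List Int) (bs : List Int) : ∀ (i : Int) (ans : Int), i < a.length →
    (bs.foldl (stepB a) (ans, i)).1 = ans + gRec ((a.take (i + 1).toNat).reverse) bs := by
  induction bs with
  | nil => intro i ans _; simp [gRec_nil_right]
  | cons v bs ih =>
    intro i ans hi
    by_cases h0 : 0 ≤ i
    · have hn : i.toNat < a.length := by omega
      have hps : (i + 1).toNat = i.toNat + 1 := by omega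
      have htake : (a.take (i + 1).toNat).reverse = a[i.toNat] :: (a.take i.toNat).reverse := by
        rw [hps, List.take_add_one, List.getElem?_eq_getElem hn]
        simp
      have hget : PySem.List.pyGetD a i 0 = a[i.toNat] := by
        exact PySem.List.pyGetD_eq_getElem (xs := a) (i := i) (d := 0) h0 (by omega)
      by_cases hw : v > a[i.toNat]
      · have : stepB a (ans, i) v = (ans + 1, i - 1) := by
          simp [stepB, hget, h0, hw]
        rw [List.foldl_cons, this, ih (i - 1) (ans + 1) (by omega)]
        have : (i - 1 + 1).toNat = i.toNat := by omega
        rw [this, htake]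
        simp [gRec, hw]; ring
      · have : stepB a (ans, i) v = (ans, i) := by
          simp [stepB, hget, hw]
        rw [List.foldl_cons, this, ih i ans hi, htake]
        simp [gRec, hw]
    · have : stepB a (ans, i) v = (ans, i) := by
        simp only [stepB]; rw [if_neg (fun h => absurd h.1 (by omega))]
      have htake : (i + 1).toNat = 0 := by omega
      rw [List.foldl_cons, this, ih i ans hi]
      simp [htake, gRec_nil_left]

-- appending a maximal beaten element x to a and its beater y to b adds exactly one win
theorem gRec_snoc_win (b : List Int) : ∀ (a : List Int) (x y : Int),
    (∀ u ∈ a, u ≤ x) → x < y → gRec (a ++ [x]) (b ++ [y]) = 1 + gRec a b := by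
  induction b with
  | nil =>
    intro a x y hx hy
    cases a with
    | nil => simp [gRec, hy]
    | cons u a =>
      have hu : u ≤ x := hx u (by simp)
      simp [gRec, show y > u by omega]
  | cons v b ih =>
    intro a x y hx hy
    cases a with
    | nil =>
      by_cases hv : v > x
      · simp [gRec, hv, gRec_nil_left]
      · simp only [List.nil_append, List.cons_append, gRec, hv]
        have := ih [] x y (by simp) hy
        simpa [gRec_nil_left] using this
    | cons u a =>
      by_cases hv : v > u
      · simp only [List.cons_append, gRec, if_pos hv]
        rw [ih a x y (fun u hu => hx u (by simp [hu])) hy]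
      · simp only [List.cons_append, gRec, if_neg hv]
        exact ih (u :: a) x y hx hy

-- appending an element x that no element of b beats does not change the count
theorem gRec_snoc_skip (b : List Int) : ∀ (a : List Int) (x : Int),
    (∀ v ∈ b, v ≤ x) → gRec (a ++ [x]) b = gRec a b := by
  induction b with
  | nil => intro a x _; simp [gRec_nil_right]
  | cons v b ih =>
    intro a x hb
    have hv : v ≤ x := hb v (by simp)
    cases a with
    | nil =>
      simp only [List.nil_append, gRec, show ¬ v > x by omega]
      have := ih [] x (fun w hw => hb w (by simp [hw]))
      simpa [gRec_nil_left] using this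
    | cons u a =>
      by_cases hvu : v > u
      · simp only [List.cons_append, gRec, if_pos hvu]
        rw [ih a x (fun w hw => hb w (by simp [hw]))]
      · simp only [List.cons_append, gRec, if_neg hvu]
        exact ih (u :: a) x (fun w hw => hb w (by simp [hw]))

-- the two greedy orders agree on descending-sorted lists
theorem fRec_eq_gRec (a : List Int) : ∀ (b : List Int),
    a.Pairwise (fun p q => q ≤ p) → b.Pairwise (fun p q => q ≤ p) →
    fRec a b = gRec a.reverse b.reverse := by
  induction a with
  | nil => intro b _ _; simp [fRec, gRec_nil_left]
  | cons x a ih =>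
    intro b ha hb
    have hx : ∀ u ∈ a.reverse, u ≤ x := by
      intro u hu
      exact (List.pairwise_cons.1 ha).1 u (List.mem_reverse.1 hu)
    cases b with
    | nil => simp [fRec, gRec_nil_right]
    | cons y b' =>
      by_cases hxy : x < y
      · rw [show fRec (x :: a) (y :: b') = 1 + fRec a b' by simp [fRec, hxy]]
        rw [List.reverse_cons, List.reverse_cons, gRec_snoc_win _ _ _ _ hx hxy]
        rw [ih b' (List.pairwise_cons.1 ha).2 (List.pairwise_cons.1 hb).2]
      · rw [show fRec (x :: a) (y :: b') = fRec a (y :: b') by simp [fRec, hxy]]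
        have hby : ∀ v ∈ (y :: b').reverse, v ≤ x := by
          intro v hv
          rcases List.mem_cons.1 (List.mem_reverse.1 hv) with h | h
          · omega
          · have := (List.pairwise_cons.1 hb).1 v h; omega
        rw [List.reverse_cons, gRec_snoc_skip _ _ _ hby]
        exact ih (y :: b') (List.pairwise_cons.1 ha).2 hb

theorem solution_eq_alt (A B : List Int) : solution A B = solution_alt A B := by
  unfold solution solution_alt
  rw [PySem.List.foldl_pyRange_zero_pyGetD' (PySem.List.sorted A id true) 0 stepA
        ((0 : Int), PySem.List.sorted B id true)]
  rw [foldA_eq]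
  rw [foldB_eq (PySem.List.sorted A id true) _ _ _ (by omega)]
  have htake : ((PySem.List.sorted A id true).take
      (((PySem.List.sorted A id true).length : Int) - 1 + 1).toNat) = PySem.List.sorted A id true := by
    simp
  rw [htake]
  rw [fRec_eq_gRec _ _ (by simpa using PySem.List.sorted_pairwise_rev A id)
        (by simpa using PySem.List.sorted_pairwise_rev B id)]

-- ===== VERDICT (by name: the statement is the Claim_ definition above) =====
theorem solution_spec : Claim_equal_solution := by
  intro A B _ _
  unfold Spec_solution
  exact solution_eq_alt A B
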